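-- pv_equiv track=rewrite | github.com/DavideCorradiDev/advent_of_code_2025 | day11/main.py | count_valid_paths_impl
-- ===== SOURCE A (Python) =====
-- def count_valid_paths_impl(graph, curr, inter, cache):
--     if curr in cache:
--         return cache[curr]
--     if not curr in graph:
--         return (0, 0)
--     count = 0
--     hits = 0
--     for next in graph[curr]:
--         next_count, next_hits = count_valid_paths_impl(graph, next, inter, cache)
--         if next_hits > hits:
--             hits = next_hits
--             count = next_count
--         elif next_hits == hits:
--             count += next_count
--     if curr in inter:
--         hits += 1
--     cache[curr] = (count, hits)
--     return (count, hits)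
-- ===== SOURCE B (Python) =====
-- def count_valid_paths_impl(graph, curr, inter, cache):
--     # Bottom-up fixed-point iteration (Bellman-style rounds over the key table)
--     # instead of top-down memoized recursion; reads cache but never mutates it
--     # (A additionally stores every computed node into the caller's cache).
--
--     def lookup(n, val):
--         if n in cache:
--             return cache[n]
--         return val.get(n, (0, 0))
--
--     def node_value(n, succs, val):
--         if n in cache:
--             return cache[n]
--         count = 0
--         hits = 0
--         for s in succs:
--             next_count, next_hits = lookup(s, val)
--             if next_hits > hits:
--                 hits = next_hits
--                 count = next_count
--             elif next_hits == hits: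
--                 count += next_count
--         if n in inter:
--             hits += 1
--         return (count, hits)
--
--     val = {}
--     for _ in range(len(graph) + 2):
--         new = {}
--         for n, succs in graph.items():
--             new[n] = node_value(n, succs, val)
--         val = new
--     return lookup(curr, val)
-- ===== Notes on version B (the rewrite author's own statement) =====
-- stated objective: alternative
-- what changed: Replaces A's top-down memoized DFS recursion (which also stores every computed node into the caller's cache dict) with a pure bottom-up fixed-point iteration: len(graph)+2 Bellman-style rounds recompute a value table over all graph keys, and the answer is read off the converged table; B reads but never mutates cache.
import Mathlib
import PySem

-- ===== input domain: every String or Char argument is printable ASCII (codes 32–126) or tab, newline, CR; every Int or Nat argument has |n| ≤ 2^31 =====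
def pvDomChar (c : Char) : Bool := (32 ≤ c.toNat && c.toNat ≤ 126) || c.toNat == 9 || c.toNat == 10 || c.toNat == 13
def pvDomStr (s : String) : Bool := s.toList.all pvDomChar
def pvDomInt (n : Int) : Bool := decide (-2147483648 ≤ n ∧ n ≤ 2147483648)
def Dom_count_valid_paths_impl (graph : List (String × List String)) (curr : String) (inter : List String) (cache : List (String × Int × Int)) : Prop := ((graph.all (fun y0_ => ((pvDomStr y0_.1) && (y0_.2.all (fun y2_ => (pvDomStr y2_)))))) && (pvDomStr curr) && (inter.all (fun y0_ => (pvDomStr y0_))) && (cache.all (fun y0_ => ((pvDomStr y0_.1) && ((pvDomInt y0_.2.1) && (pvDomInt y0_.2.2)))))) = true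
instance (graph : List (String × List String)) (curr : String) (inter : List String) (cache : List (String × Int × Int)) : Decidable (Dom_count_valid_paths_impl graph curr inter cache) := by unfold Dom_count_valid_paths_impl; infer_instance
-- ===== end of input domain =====

-- B replaces A's top-down memoized recursion (which also mutates the caller's cache) by a
-- bottom-up fixed-point iteration over the key table; equivalence is about the RETURN value
-- only — A stores computed nodes into the caller's cache, B never mutates its arguments.

-- ===== PORT A =====
-- the tie-aggregation step shared by both Python sources (max of hits, summing counts on ties)
def pvAgg (ch r : Int × Int) : Int × Int :=
  if ch.2 < r.2 then r else if r.2 = ch.2 then (ch.1 + r.1, ch.2) else ch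

-- A's recursion; fuel only makes the recursion total (never exhausted under Pre_)
def pvGoA (g : PySem.Dict String (List String)) (inter : List String) :
    Nat → String → PySem.Dict String (Int × Int) → (Int × Int) × PySem.Dict String (Int × Int)
  | 0, _, c => ((0, 0), c)
  | fuel+1, n, c =>
    match PySem.Dict.get? c n with
    | some v => (v, c)
    | none =>
      match PySem.Dict.get? g n with
      | none => ((0, 0), c)
      | some succs =>
        let r := succs.foldl (fun acc s =>
          let q := pvGoA g inter fuel s acc.2
          (pvAgg acc.1 q.1, q.2)) (((0 : Int), (0 : Int)), c)
        let v := if inter.contains n then (r.1.1, r.1.2 + 1) else r.1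
        (v, PySem.Dict.insert r.2 n v)

def count_valid_paths_impl (graph : List (String × List String)) (curr : String) (inter : List String) (cache : List (String × Int × Int)) : Int × Int :=
  (pvGoA (PySem.Dict.ofList graph) inter (graph.length + 2) curr (PySem.Dict.ofList cache)).1

-- ===== PORT B =====
def pvLookupB (c val : PySem.Dict String (Int × Int)) (n : String) : Int × Int :=
  match PySem.Dict.get? c n with
  | some v => v
  | none => PySem.Dict.getD val n (0, 0)

def pvNodeVal (inter : List String) (c val : PySem.Dict String (Int × Int)) (p : String × List String) : Int × Int :=
  match PySem.Dict.get? c p.1 with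
  | some v => v
  | none =>
    let ch := p.2.foldl (fun ch s => pvAgg ch (pvLookupB c val s)) ((0 : Int), (0 : Int))
    if inter.contains p.1 then (ch.1, ch.2 + 1) else ch

def pvRoundB (g : PySem.Dict String (List String)) (inter : List String)
    (c val : PySem.Dict String (Int × Int)) : PySem.Dict String (Int × Int) :=
  g.items.foldl (fun nw p => PySem.Dict.insert nw p.1 (pvNodeVal inter c val p)) PySem.Dict.empty

def count_valid_paths_impl_alt (graph : List (String × List String)) (curr : String) (inter : List String) (cache : List (String × Int × Int)) : Int × Int :=
  let g := PySem.Dict.ofList graph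
  let c := PySem.Dict.ofList cache
  let val := (pvRoundB g inter c)^[g.size + 2] PySem.Dict.empty
  pvLookupB c val curr

-- ===== PRECONDITION & SPEC =====
-- successors A's recursion descends through from n: none if n is cached or absent from graph
def pvFreeSucc (g : PySem.Dict String (List String)) (c : PySem.Dict String (Int × Int)) (n : String) : List String :=
  match PySem.Dict.get? c n with
  | some _ => []
  | none => (PySem.Dict.get? g n).getD []

-- one round of the longest-free-path (Bellman) iteration over the keys of g
def pvDepthStep (g : PySem.Dict String (List String)) (c : PySem.Dict String (Int × Int))
    (tbl : PySem.Dict String Nat) : PySem.Dict String Nat :=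
  PySem.Dict.mk ((PySem.Dict.keys g).map (fun n =>
    (n, (pvFreeSucc g c n).foldl (fun a s => max a (1 + PySem.Dict.getD tbl s 0)) 0)))

def pvDepthTbl (g : PySem.Dict String (List String)) (c : PySem.Dict String (Int × Int)) (k : Nat) : PySem.Dict String Nat :=
  (pvDepthStep g c)^[k] (PySem.Dict.mk ((PySem.Dict.keys g).map (fun n => (n, 0))))

-- Pre_ excludes exactly the inputs on which A's recursion never returns (a cycle of uncached
-- graph nodes reachable from curr: the Python A raises RecursionError there): the truncated
-- longest-free-path value AT curr is already stable at depth |graph|+1, which holds iff every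
-- descent chain from curr is finite.
def Pre_count_valid_paths_impl (graph : List (String × List String)) (curr : String) (inter : List String) (cache : List (String × Int × Int)) : Prop :=
  PySem.Dict.getD (pvDepthTbl (PySem.Dict.ofList graph) (PySem.Dict.ofList cache) ((PySem.Dict.ofList graph).size + 2)) curr 0
    = PySem.Dict.getD (pvDepthTbl (PySem.Dict.ofList graph) (PySem.Dict.ofList cache) ((PySem.Dict.ofList graph).size + 1)) curr 0

instance (graph : List (String × List String)) (curr : String) (inter : List String) (cache : List (String × Int × Int)) : Decidable (Pre_count_valid_paths_impl graph curr inter cache) := by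
  unfold Pre_count_valid_paths_impl; infer_instance

def pvWitness_count_valid_paths_impl : (List (String × List String)) × String × List String × (List (String × Int × Int)) :=
  ([("a", ["b", "c"]), ("b", ["c"]), ("c", [])], "a", ["b"], [("c", (1, 0))])

def Spec_count_valid_paths_impl (graph : List (String × List String)) (curr : String) (inter : List String) (cache : List (String × Int × Int)) (out : Int × Int) : Prop := out = count_valid_paths_impl_alt graph curr inter cache
instance (graph : List (String × List String)) (curr : String) (inter : List String) (cache : List (String × Int × Int)) (out : Int × Int) : Decidable (Spec_count_valid_paths_impl graph curr inter cache out) := by unfold Spec_count_valid_paths_impl; infer_instance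

-- ===== CLAIM (what is proved, stated in full; the proofs are below) =====
def Claim_equal_count_valid_paths_impl : Prop := ∀ (graph : List (String × List String)) (curr : String) (inter : List String) (cache : List (String × Int × Int)), Dom_count_valid_paths_impl graph curr inter cache → Pre_count_valid_paths_impl graph curr inter cache → Spec_count_valid_paths_impl graph curr inter cache (count_valid_paths_impl graph curr inter cache)

-- ===== LEMMAS AND PROOFS =====

-- the mathematical longest-free-path function the table iteration realizes (proofs only)
def pvDm (g : PySem.Dict String (List String)) (c : PySem.Dict String (Int × Int)) : Nat → String → Nat
  | 0, _ => 0
  | k+1, n => (pvFreeSucc g c n).foldl (fun a s => max a (1 + pvDm g c k s)) 0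

-- l is a list of nodes visited by one chain of A's recursive descents starting at n
inductive pvFP (g : PySem.Dict String (List String)) (c : PySem.Dict String (Int × Int)) : String → List String → Prop where
  | nil (n : String) : pvFP g c n []
  | cons {n s : String} {l : List String} {succs : List String}
      (hc : PySem.Dict.get? c n = none) (hg : PySem.Dict.get? g n = some succs)
      (hs : s ∈ succs) (hp : pvFP g c s l) : pvFP g c n (s :: l)

-- the pure value function, computed to recursion depth k (cache / absence override first)
def pvF (g : PySem.Dict String (List String)) (c : PySem.Dict String (Int × Int)) (inter : List String) : Nat → String → Int × Int
  | k, n =>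
    match PySem.Dict.get? c n with
    | some v => v
    | none =>
      match PySem.Dict.get? g n with
      | none => (0, 0)
      | some succs =>
        match k with
        | 0 => (0, 0)
        | k+1 =>
          let ch := succs.foldl (fun ch s => pvAgg ch (pvF g c inter k s)) ((0 : Int), (0 : Int))
          if inter.contains n then (ch.1, ch.2 + 1) else ch

theorem pv_foldl_max_le (f : String → Nat) (b : Nat) :
    ∀ (l : List String) (a : Nat), a ≤ b → (∀ s ∈ l, f s ≤ b) →
      l.foldl (fun a s => max a (f s)) a ≤ b := by
  intro l
  induction l with
  | nil => intro a ha _; simpa using ha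
  | cons x xs ih =>
    intro a ha hf
    simp only [List.foldl_cons]
    exact ih _ (by simp [ha, hf x (by simp)]) (fun s hs => hf s (by simp [hs]))

theorem pv_init_le_foldl_max (f : String → Nat) :
    ∀ (l : List String) (a : Nat), a ≤ l.foldl (fun a s => max a (f s)) a := by
  intro l
  induction l with
  | nil => intro a; simp
  | cons x xs ih =>
    intro a
    simp only [List.foldl_cons]
    exact le_trans (le_max_left _ _) (ih _)

theorem pv_le_foldl_max (f : String → Nat) :
    ∀ (l : List String) (a : Nat) (s : String), s ∈ l →
      f s ≤ l.foldl (fun a s => max a (f s)) a := by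
  have hmono : ∀ (l : List String) (a b : Nat), a ≤ b →
      l.foldl (fun a s => max a (f s)) a ≤ l.foldl (fun a s => max a (f s)) b := by
    intro l
    induction l with
    | nil => intro a b h; simpa using h
    | cons x xs ih => intro a b h; simp only [List.foldl_cons]; exact ih _ _ (by omega)
  intro l
  induction l with
  | nil => intro a s hs; simp at hs
  | cons x xs ih =>
    intro a s hs
    simp only [List.foldl_cons]
    rcases List.mem_cons.mp hs with h | h
    · subst h
      exact le_trans (le_max_right a (f s)) (pv_init_le_foldl_max f xs _)
    · exact ih _ s h

theorem pv_getD_map (f : String → Nat) :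
    ∀ (l : List String) (x : String),
      PySem.Dict.getD (PySem.Dict.mk (l.map (fun n => (n, f n)))) x 0 = if x ∈ l then f x else 0 := by
  intro l
  induction l with
  | nil => intro x; simp [PySem.Dict.getD, PySem.Dict.get?]
  | cons n ns ih =>
    intro x
    simp only [List.map_cons]
    rw [PySem.Dict.getD_eq_get?_getD, PySem.Dict.get?_mk_cons]
    by_cases h : n = x
    · subst h; simp
    · have hb : (n == x) = false := by simp [h]
      rw [hb]
      simp only [Bool.false_eq_true, if_false]
      rw [← PySem.Dict.getD_eq_get?_getD, ih x]
      by_cases hx : x ∈ ns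
      · simp [hx, List.mem_cons]
      · simp [hx, List.mem_cons, Ne.symm h]

theorem pv_foldl_agg_congr (f h : String → Int × Int) :
    ∀ (l : List String) (a : Int × Int), (∀ s ∈ l, f s = h s) →
      l.foldl (fun ch s => pvAgg ch (f s)) a = l.foldl (fun ch s => pvAgg ch (h s)) a := by
  intro l
  induction l with
  | nil => intro a _; rfl
  | cons x xs ih =>
    intro a hfh
    simp only [List.foldl_cons]
    rw [hfh x (by simp), ih _ (fun s hs => hfh s (by simp [hs]))]

theorem pvDm_of_not_mem (g : PySem.Dict String (List String)) (c : PySem.Dict String (Int × Int))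
    (k : Nat) (x : String) (hx : x ∉ PySem.Dict.keys g) : pvDm g c k x = 0 := by
  have hg : PySem.Dict.get? g x = none := (PySem.Dict.get?_eq_none_iff_not_mem_keys g x).mpr hx
  cases k with
  | zero => rfl
  | succ k =>
    have : pvFreeSucc g c x = [] := by
      unfold pvFreeSucc
      cases hc : PySem.Dict.get? c x with
      | some v => rfl
      | none => simp [hg]
    simp [pvDm, this]

theorem pvDm_le (g : PySem.Dict String (List String)) (c : PySem.Dict String (Int × Int)) :
    ∀ (k : Nat) (n : String), pvDm g c k n ≤ k := by
  intro k
  induction k with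
  | zero => intro n; simp [pvDm]
  | succ k ih =>
    intro n
    exact pv_foldl_max_le _ _ _ _ (by omega) (fun s _ => by have := ih s; omega)

theorem pv_depthStep_getD (g : PySem.Dict String (List String)) (c : PySem.Dict String (Int × Int))
    (tbl : PySem.Dict String Nat) (k : Nat) (htbl : ∀ s, PySem.Dict.getD tbl s 0 = pvDm g c k s) :
    ∀ x, PySem.Dict.getD (pvDepthStep g c tbl) x 0
        = if x ∈ PySem.Dict.keys g then pvDm g c (k + 1) x else 0 := by
  intro x
  unfold pvDepthStep
  have hfun : (fun (a : Nat) s => max a (1 + PySem.Dict.getD tbl s 0))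
      = (fun (a : Nat) s => max a (1 + pvDm g c k s)) := by
    funext a s; rw [htbl]
  have h2 := pv_getD_map (fun n => (pvFreeSucc g c n).foldl (fun a s => max a (1 + PySem.Dict.getD tbl s 0)) 0) (PySem.Dict.keys g) x
  simp only [hfun] at h2 ⊢
  rw [h2]
  by_cases hx : x ∈ PySem.Dict.keys g <;> simp [hx, pvDm]

theorem pv_depthTbl_eq (g : PySem.Dict String (List String)) (c : PySem.Dict String (Int × Int)) :
    ∀ (k : Nat) (x : String), PySem.Dict.getD (pvDepthTbl g c k) x 0 = pvDm g c k x := by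
  intro k
  induction k with
  | zero =>
    intro x
    unfold pvDepthTbl
    simp only [Function.iterate_zero, id]
    have := pv_getD_map (fun _ => 0) (PySem.Dict.keys g) x
    simp only [this]
    simp [pvDm]
  | succ k ih =>
    intro x
    unfold pvDepthTbl
    rw [Function.iterate_succ_apply']
    have hstep := pv_depthStep_getD g c (pvDepthTbl g c k) k ih x
    unfold pvDepthTbl at hstep
    rw [hstep]
    by_cases hx : x ∈ PySem.Dict.keys g
    · simp [hx]
    · simp [hx, pvDm_of_not_mem g c _ x hx]

-- a descent chain of length m forces the truncated longest-path value min(m,k) at its root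
theorem pvDm_ge_chain (g : PySem.Dict String (List String)) (c : PySem.Dict String (Int × Int)) :
    ∀ {n : String} {l : List String}, pvFP g c n l → ∀ k, min l.length k ≤ pvDm g c k n := by
  intro n l h
  induction h with
  | nil => intro k; simp
  | @cons n s l succs hc hg hs hp ih =>
    intro k
    cases k with
    | zero => simp
    | succ k =>
      have hfs : pvFreeSucc g c n = succs := by unfold pvFreeSucc; rw [hc, hg]; rfl
      have hle : 1 + pvDm g c k s ≤ (pvFreeSucc g c n).foldl (fun a s => max a (1 + pvDm g c k s)) 0 :=
        pv_le_foldl_max (fun s => 1 + pvDm g c k s) (pvFreeSucc g c n) 0 s (by rw [hfs]; exact hs)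
      have hdm : pvDm g c (k + 1) n
          = (pvFreeSucc g c n).foldl (fun a s => max a (1 + pvDm g c k s)) 0 := rfl
      have hih := ih k
      rw [hdm]
      simp only [List.length_cons]
      omega

theorem pvF_stab (g : PySem.Dict String (List String)) (c : PySem.Dict String (Int × Int)) (inter : List String) :
    ∀ (d : Nat) (n : String) (k : Nat),
      (∀ l, pvFP g c n l → l.length < d) → d ≤ k → pvF g c inter k n = pvF g c inter d n := by
  intro d
  induction d with
  | zero => intro n k hb _; exact absurd (hb [] (pvFP.nil n)) (by omega)
  | succ d ih =>
    intro n k hb hdk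
    conv_lhs => rw [pvF]
    conv_rhs => rw [pvF]
    cases hc : PySem.Dict.get? c n with
    | some v => rfl
    | none =>
      cases hg : PySem.Dict.get? g n with
      | none => rfl
      | some succs =>
        cases k with
        | zero => omega
        | succ m =>
          have hmem : ∀ s ∈ succs, pvF g c inter m s = pvF g c inter d s := by
            intro s hs
            refine ih s m (fun l hl => ?_) (by omega)
            have := hb (s :: l) (pvFP.cons hc hg hs hl)
            simp only [List.length_cons] at this
            omega
          simp only
          rw [pv_foldl_agg_congr (fun s => pvF g c inter m s) (fun s => pvF g c inter d s) succs _ hmem]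

-- the cache invariant threaded through A's recursion
def pvInv (g : PySem.Dict String (List String)) (c₀ : PySem.Dict String (Int × Int)) (inter : List String)
    (T : Nat) (c' : PySem.Dict String (Int × Int)) : Prop :=
  (∀ k v, PySem.Dict.get? c' k = some v → pvF g c₀ inter T k = v) ∧
  (∀ k, (PySem.Dict.get? c₀ k).isSome → (PySem.Dict.get? c' k).isSome)

theorem pvGoA_main (g : PySem.Dict String (List String)) (c₀ : PySem.Dict String (Int × Int)) (inter : List String)
    (T K : Nat)
    (hfixT : ∀ n succs, PySem.Dict.get? c₀ n = none → PySem.Dict.get? g n = some succs →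
      (∀ l, pvFP g c₀ n l → l.length ≤ K) →
      pvF g c₀ inter T n =
        (let ch := succs.foldl (fun ch s => pvAgg ch (pvF g c₀ inter T s)) ((0 : Int), (0 : Int));
         if inter.contains n then (ch.1, ch.2 + 1) else ch)) :
    ∀ (fuel : Nat) (n : String) (c' : PySem.Dict String (Int × Int)),
      pvInv g c₀ inter T c' → (∀ l, pvFP g c₀ n l → l.length < fuel) →
      (∀ l, pvFP g c₀ n l → l.length ≤ K) →
      (pvGoA g inter fuel n c').1 = pvF g c₀ inter T n ∧
      pvInv g c₀ inter T (pvGoA g inter fuel n c').2 ∧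
      (∀ k, (PySem.Dict.get? c' k).isSome → (PySem.Dict.get? (pvGoA g inter fuel n c').2 k).isSome) := by
  intro fuel
  induction fuel with
  | zero => intro n c' _ hb _; exact absurd (hb [] (pvFP.nil n)) (by omega)
  | succ fuel ih =>
    intro n c' hInv hb hbK
    -- inner fold lemma, by induction over the successor list, threading the cache
    have hfold : ∀ (ss : List String),
        (∀ s ∈ ss, (∀ l, pvFP g c₀ s l → l.length < fuel) ∧ (∀ l, pvFP g c₀ s l → l.length ≤ K)) →
        ∀ (acc : (Int × Int) × PySem.Dict String (Int × Int)), pvInv g c₀ inter T acc.2 →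
        ((ss.foldl (fun acc s =>
            let q := pvGoA g inter fuel s acc.2
            (pvAgg acc.1 q.1, q.2)) acc).1
            = ss.foldl (fun ch s => pvAgg ch (pvF g c₀ inter T s)) acc.1 ∧
          pvInv g c₀ inter T (ss.foldl (fun acc s =>
            let q := pvGoA g inter fuel s acc.2
            (pvAgg acc.1 q.1, q.2)) acc).2 ∧
          (∀ k, (PySem.Dict.get? acc.2 k).isSome →
            (PySem.Dict.get? (ss.foldl (fun acc s =>
              let q := pvGoA g inter fuel s acc.2
              (pvAgg acc.1 q.1, q.2)) acc).2 k).isSome)) := by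
      intro ss
      induction ss with
      | nil => intro _ acc hacc; exact ⟨rfl, hacc, fun k hk => hk⟩
      | cons x xs ih2 =>
        intro hss acc hacc
        obtain ⟨h1, h2, h3⟩ := ih x acc.2 hacc (hss x (by simp)).1 (hss x (by simp)).2
        obtain ⟨r1, r2, r3⟩ := ih2 (fun s hs => hss s (by simp [hs]))
          (pvAgg acc.1 (pvGoA g inter fuel x acc.2).1, (pvGoA g inter fuel x acc.2).2) h2
        refine ⟨?_, r2, fun k hk => r3 k (h3 k hk)⟩
        simp only [List.foldl_cons]
        rw [r1]
        simp only [h1]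
    cases hc' : PySem.Dict.get? c' n with
    | some v =>
      have hv := hInv.1 n v hc'
      simp only [pvGoA, hc']
      exact ⟨hv.symm, hInv, fun k hk => hk⟩
    | none =>
      have hc0 : PySem.Dict.get? c₀ n = none := by
        cases h0 : PySem.Dict.get? c₀ n with
        | none => rfl
        | some w =>
          exfalso
          have := hInv.2 n (by simp [h0])
          rw [hc'] at this
          simp at this
      cases hg : PySem.Dict.get? g n with
      | none =>
        have hF : pvF g c₀ inter T n = (0, 0) := by
          conv_lhs => rw [pvF]
          rw [hc0, hg]
        simp only [pvGoA, hc', hg]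
        exact ⟨hF.symm, hInv, fun k hk => hk⟩
      | some succs =>
        have hsb : ∀ s ∈ succs,
            (∀ l, pvFP g c₀ s l → l.length < fuel) ∧ (∀ l, pvFP g c₀ s l → l.length ≤ K) := by
          intro s hs
          constructor
          · intro l hl
            have := hb (s :: l) (pvFP.cons hc0 hg hs hl)
            simp only [List.length_cons] at this
            omega
          · intro l hl
            have := hbK (s :: l) (pvFP.cons hc0 hg hs hl)
            simp only [List.length_cons] at this
            omega
        obtain ⟨f1, f2, f3⟩ := hfold succs hsb (((0 : Int), (0 : Int)), c') hInv
        have hFn := hfixT n succs hc0 hg hbK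
        simp only [pvGoA, hc', hg]
        refine ⟨?_, ?_, ?_⟩
        · show (if inter.contains n = true then _ else _) = pvF g c₀ inter T n
          rw [hFn]
          simp only [f1]
        · constructor
          · intro k w hkw
            rw [PySem.Dict.get?_insert] at hkw
            by_cases hkn : k = n
            · rw [if_pos hkn] at hkw
              subst hkn
              rw [hFn]
              simp only [f1] at hkw ⊢
              exact Option.some_inj.mp hkw
            · rw [if_neg hkn] at hkw
              exact f2.1 k w hkw
          · intro k hk
            by_cases hkn : k = n
            · subst hkn; simp [PySem.Dict.get?_insert_self]
            · rw [PySem.Dict.get?_insert, if_neg hkn]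
              exact f2.2 k hk
        · intro k hk
          by_cases hkn : k = n
          · subst hkn; simp [PySem.Dict.get?_insert_self]
          · rw [PySem.Dict.get?_insert, if_neg hkn]
            exact f3 k hk

theorem pv_get?_foldl_insert_not_mem {β : Type} (F : String × List String → β) :
    ∀ (l : List (String × List String)) (d : PySem.Dict String β) (x : String),
      x ∉ l.map Prod.fst →
      PySem.Dict.get? (l.foldl (fun nw p => PySem.Dict.insert nw p.1 (F p)) d) x = PySem.Dict.get? d x := by
  intro l
  induction l with
  | nil => intro d x _; rfl
  | cons p ps ih =>
    intro d x hx
    simp only [List.map_cons, List.mem_cons, not_or] at hx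
    simp only [List.foldl_cons]
    rw [ih _ x hx.2, PySem.Dict.get?_insert, if_neg hx.1]

theorem pv_get?_foldl_insert_mem {β : Type} (F : String × List String → β) :
    ∀ (l : List (String × List String)) (d : PySem.Dict String β) (x : String) (sx : List String),
      (l.map Prod.fst).Nodup → (x, sx) ∈ l →
      PySem.Dict.get? (l.foldl (fun nw p => PySem.Dict.insert nw p.1 (F p)) d) x = some (F (x, sx)) := by
  intro l
  induction l with
  | nil => intro d x sx _ hmem; simp at hmem
  | cons p ps ih =>
    intro d x sx hnd hmem
    simp only [List.map_cons, List.nodup_cons] at hnd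
    simp only [List.foldl_cons]
    rcases List.mem_cons.mp hmem with h | h
    · have hx : x = p.1 := by rw [← h]
      have hnot : x ∉ ps.map Prod.fst := by rw [hx]; exact hnd.1
      rw [pv_get?_foldl_insert_not_mem F ps _ x hnot, hx, ← h, PySem.Dict.get?_insert_self]
    · exact ih _ x sx hnd.2 h

theorem pvB_val (g : PySem.Dict String (List String)) (c : PySem.Dict String (Int × Int)) (inter : List String)
    (hnd : (PySem.Dict.keys g).Nodup) :
    ∀ (k : Nat) (x : String),
      pvLookupB c ((pvRoundB g inter c)^[k] PySem.Dict.empty) x = pvF g c inter k x := by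
  have hndi : (g.items.map Prod.fst).Nodup := by
    simpa [PySem.Dict.keys] using hnd
  intro k
  induction k with
  | zero =>
    intro x
    unfold pvLookupB
    cases hc : PySem.Dict.get? c x with
    | some v => conv_rhs => rw [pvF]; rw [hc]
    | none =>
      conv_rhs => rw [pvF]
      rw [hc]
      cases hg : PySem.Dict.get? g x with
      | none => simp [PySem.Dict.getD_empty]
      | some succs => simp [PySem.Dict.getD_empty]
  | succ k ih =>
    intro x
    rw [Function.iterate_succ_apply']
    cases hcx : PySem.Dict.get? c x with
    | some v =>
      unfold pvLookupB
      rw [hcx]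
      conv_rhs => rw [pvF]
      rw [hcx]
    | none =>
      have hlhs : pvLookupB c (pvRoundB g inter c ((pvRoundB g inter c)^[k] PySem.Dict.empty)) x
          = PySem.Dict.getD (pvRoundB g inter c ((pvRoundB g inter c)^[k] PySem.Dict.empty)) x (0, 0) := by
        unfold pvLookupB
        rw [hcx]
      rw [hlhs]
      cases hg : PySem.Dict.get? g x with
      | none =>
        have hxk : x ∉ g.items.map Prod.fst := by
          have := (PySem.Dict.get?_eq_none_iff_not_mem_keys g x).mp hg
          simpa [PySem.Dict.keys] using this
        have hD : PySem.Dict.get? (pvRoundB g inter c ((pvRoundB g inter c)^[k] PySem.Dict.empty)) x = none := by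
          unfold pvRoundB
          rw [pv_get?_foldl_insert_not_mem _ _ _ _ hxk]
          exact PySem.Dict.get?_empty x
        rw [PySem.Dict.getD_eq_get?_getD, hD]
        conv_rhs => rw [pvF]
        rw [hcx, hg]
        rfl
      | some succs =>
        have hmemit : (x, succs) ∈ g.items := PySem.Dict.mem_items_of_get?_eq_some g hg
        have hD : PySem.Dict.get? (pvRoundB g inter c ((pvRoundB g inter c)^[k] PySem.Dict.empty)) x
            = some (pvNodeVal inter c ((pvRoundB g inter c)^[k] PySem.Dict.empty) (x, succs)) := by
          unfold pvRoundB
          exact pv_get?_foldl_insert_mem _ g.items _ x succs hndi hmemit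
        rw [PySem.Dict.getD_eq_get?_getD, hD]
        unfold pvNodeVal
        simp only
        rw [hcx]
        conv_rhs => rw [pvF]
        rw [hcx, hg]
        simp only
        rw [pv_foldl_agg_congr (fun s => pvLookupB c ((pvRoundB g inter c)^[k] PySem.Dict.empty) s)
          (fun s => pvF g c inter k s) succs _ (fun s _ => ih s)]
        rfl

theorem pv_size_foldl_insert {β : Type} :
    ∀ (ps : List (String × β)) (d : PySem.Dict String β),
      (ps.foldl (fun acc p => acc.insert p.1 p.2) d).size ≤ d.size + ps.length := by
  intro ps
  induction ps with
  | nil => intro d; simp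
  | cons p pp ih =>
    intro d
    simp only [List.foldl_cons, List.length_cons]
    have h1 := ih (d.insert p.1 p.2)
    have h2 : (d.insert p.1 p.2).size ≤ d.size + 1 := by
      rw [PySem.Dict.size_insert]; split_ifs <;> omega
    omega

theorem pv_size_ofList_le {β : Type} (l : List (String × β)) :
    (PySem.Dict.ofList l).size ≤ l.length := by
  have h := pv_size_foldl_insert l PySem.Dict.empty
  have he : (PySem.Dict.empty : PySem.Dict String β).size = 0 := rfl
  unfold PySem.Dict.ofList PySem.Dict.update
  omega

-- ===== VERDICT (by name: the statement is the Claim_ definition above) =====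
theorem count_valid_paths_impl_spec : Claim_equal_count_valid_paths_impl := by
  unfold Claim_equal_count_valid_paths_impl
  intro graph curr inter cache _ hpre
  unfold Spec_count_valid_paths_impl
  unfold Pre_count_valid_paths_impl at hpre
  set g := PySem.Dict.ofList graph with hgdef
  set c₀ := PySem.Dict.ofList cache with hcdef
  rw [pv_depthTbl_eq g c₀ (g.size + 2) curr, pv_depthTbl_eq g c₀ (g.size + 1) curr] at hpre
  -- every descent chain from curr has length ≤ g.size + 1
  have hlen : ∀ l, pvFP g c₀ curr l → l.length ≤ g.size + 1 := by
    intro l h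
    have h1 := pvDm_ge_chain g c₀ h (g.size + 2)
    have h2 := pvDm_le g c₀ (g.size + 1) curr
    omega
  -- bounds propagate from curr to every node A actually descends through (via chain extension),
  -- so the hfixT hypothesis only needs the K-bound at the node being unfolded
  have hfixT : ∀ n succs, PySem.Dict.get? c₀ n = none → PySem.Dict.get? g n = some succs →
      (∀ l, pvFP g c₀ n l → l.length ≤ g.size + 1) →
      pvF g c₀ inter (g.size + 2) n =
        (let ch := succs.foldl (fun ch s => pvAgg ch (pvF g c₀ inter (g.size + 2) s)) ((0 : Int), (0 : Int));
         if inter.contains n then (ch.1, ch.2 + 1) else ch) := by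
    intro n succs hc hgg hbn
    have h1 := pvF_stab g c₀ inter (g.size + 2) n (g.size + 2 + 1)
      (fun l hl => by have := hbn l hl; omega) (by omega)
    conv_lhs => rw [← h1]
    conv_lhs => rw [pvF]
    rw [hc, hgg]
  have hInv0 : pvInv g c₀ inter (g.size + 2) c₀ := by
    constructor
    · intro k v hkv
      conv_lhs => rw [pvF]
      rw [hkv]
    · intro k hk; exact hk
  have hbA : ∀ l, pvFP g c₀ curr l → l.length < graph.length + 2 := by
    intro l h
    have h1 := hlen l h
    have h2 : g.size ≤ graph.length := pv_size_ofList_le graph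
    omega
  have hA := (pvGoA_main g c₀ inter (g.size + 2) (g.size + 1) hfixT (graph.length + 2) curr c₀ hInv0 hbA hlen).1
  have hB := pvB_val g c₀ inter (PySem.Dict.nodup_keys_ofList graph) (g.size + 2) curr
  show (pvGoA g inter (graph.length + 2) curr c₀).1
      = pvLookupB c₀ ((pvRoundB g inter c₀)^[g.size + 2] PySem.Dict.empty) curr
  rw [hA, hB]
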